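-- pv_equiv track=rewrite | github.com/victorcastaneda621/python-patricia-tries | data_structures/patricia_trie/transaction_to_item_enc.py | encoding_to_transaction
-- ===== SOURCE A (Python) =====
-- def encoding_to_transaction(encoding: int, encoding_to_item: dict, bits_per_item: int):
--     t = []
--     mask = (1 << bits_per_item) - 1
--     while encoding > 0:
--         # With this, we obtain the bits_per_item-th least significant bits
--         encoded_item = encoding & mask
--
--         t.append(encoding_to_item[encoded_item])
--
--         # Drop the bits from the added item
--         encoding = encoding >> bits_per_item
--     return t
-- ===== SOURCE B (Python) =====
-- def encoding_to_transaction(encoding: int, encoding_to_item: dict, bits_per_item: int):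
--     if encoding <= 0:
--         return []
--     # Go through the binary-string representation: pad it on the left to a
--     # multiple of bits_per_item, scan it left-to-right (MSB first) in
--     # bits_per_item-wide slices parsed with int(_, 2), then reverse.
--     bits = bin(encoding)[2:]
--     bits = "0" * ((-len(bits)) % bits_per_item) + bits
--     items = []
--     for i in range(0, len(bits), bits_per_item):
--         items.append(encoding_to_item[int(bits[i:i + bits_per_item], 2)])
--     items.reverse()
--     return items
-- ===== Notes on version B (the rewrite author's own statement) =====
-- stated objective: alternative
-- what changed: A destructively shifts a running integer, masking off the low chunk per loop iteration; B instead goes through the binary-string representation: it left-pads bin(encoding) to a multiple of bits_per_item, scans the string MSB-first in fixed-width slices parsed with int(_, 2), and reverses the collected items.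
import Mathlib
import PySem

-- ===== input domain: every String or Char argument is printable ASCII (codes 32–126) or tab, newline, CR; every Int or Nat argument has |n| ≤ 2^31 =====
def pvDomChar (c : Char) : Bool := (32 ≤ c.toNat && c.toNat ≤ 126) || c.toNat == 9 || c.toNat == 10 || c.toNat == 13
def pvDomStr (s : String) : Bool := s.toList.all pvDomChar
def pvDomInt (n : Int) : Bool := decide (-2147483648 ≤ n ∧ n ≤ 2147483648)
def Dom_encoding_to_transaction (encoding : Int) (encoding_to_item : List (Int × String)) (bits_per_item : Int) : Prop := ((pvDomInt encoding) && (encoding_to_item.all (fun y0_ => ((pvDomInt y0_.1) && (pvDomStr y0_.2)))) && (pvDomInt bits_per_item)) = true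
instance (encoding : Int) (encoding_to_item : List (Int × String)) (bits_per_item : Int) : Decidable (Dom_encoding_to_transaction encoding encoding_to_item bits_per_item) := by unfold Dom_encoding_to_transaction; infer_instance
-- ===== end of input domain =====

-- B decodes via the binary-string representation: pad bin(encoding) to a multiple of
-- bits_per_item, scan it MSB-first in fixed-width slices parsed with int(_,2), then reverse
-- (alternative decomposition; A shifts a running integer LSB-first).


-- ===== PORT A =====
-- the while-loop: each iteration appends the item for the low chunk and shifts it away.
-- The '1 ≤ bits_per_item' conjunct is a totality guard only (Python loops forever on
-- bits_per_item = 0 with encoding > 0; Pre_ excludes that).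
def etLoopA (encoding_to_item : List (Int × String)) (bits_per_item : Int) (mask : Int)
    (encoding : Int) : List String :=
  if h : 0 < encoding ∧ 1 ≤ bits_per_item then
    ((PySem.Dict.get? (PySem.Dict.mk encoding_to_item) (PySem.Int.band encoding mask)).getD "")
      :: etLoopA encoding_to_item bits_per_item mask (encoding >>> bits_per_item.toNat)
  else []
termination_by encoding.toNat
decreasing_by
  obtain ⟨m, rfl⟩ := Int.eq_ofNat_of_zero_le h.1.le
  show ((Int.ofNat m) >>> bits_per_item.toNat).toNat < (Int.ofNat m).toNat
  have hm : 0 < m := by exact_mod_cast h.1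
  have hk : 1 ≤ bits_per_item.toNat := by omega
  show m >>> bits_per_item.toNat < m
  rw [Nat.shiftRight_eq_div_pow]
  exact Nat.div_lt_self hm (Nat.one_lt_two_pow_iff.mpr (by omega))

def encoding_to_transaction (encoding : Int) (encoding_to_item : List (Int × String)) (bits_per_item : Int) : List String :=
  etLoopA encoding_to_item bits_per_item ((1 <<< bits_per_item.toNat) - 1) encoding

-- ===== PORT B =====
-- bin(n)[2:] for n > 0, as a list of '0'/'1' characters (MSB first); exact there.
def pvBinStr (n : Nat) : List Char :=
  if h : n = 0 then [] else pvBinStr (n / 2) ++ [if n % 2 == 1 then '1' else '0']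
termination_by n
decreasing_by exact Nat.div_lt_self (Nat.pos_of_ne_zero h) (by omega)

-- int(s, 2) on a string of '0'/'1' characters; exact there.
def pvParseBin (s : List Char) : Nat :=
  s.foldl (fun a c => 2 * a + (if c == '1' then 1 else 0)) 0

-- the 'for i in range(0, len(bits), k)' loop: consume k characters per step, MSB first.
-- The '1 ≤ k' conjunct is a totality guard only (k ≥ 1 whenever the loop is reached).
def pvChunkLoop (encoding_to_item : List (Int × String)) (k : Nat) (s : List Char) : List String :=
  if h : s ≠ [] ∧ 1 ≤ k then
    ((PySem.Dict.get? (PySem.Dict.mk encoding_to_item) ((pvParseBin (s.take k) : Nat) : Int)).getD "")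
      :: pvChunkLoop encoding_to_item k (s.drop k)
  else []
termination_by s.length
decreasing_by
  have : 0 < s.length := List.length_pos_iff.mpr h.1
  simp only [List.length_drop]; omega

def encoding_to_transaction_alt (encoding : Int) (encoding_to_item : List (Int × String)) (bits_per_item : Int) : List String :=
  if encoding ≤ 0 then []
  else
    (pvChunkLoop encoding_to_item bits_per_item.toNat
      (List.replicate (PySem.Int.mod (-((pvBinStr encoding.toNat).length : Int)) bits_per_item).toNat '0'
        ++ pvBinStr encoding.toNat)).reverse

-- ===== PRECONDITION & SPEC =====
-- Pre_ = exactly where Python A returns: bits_per_item ≥ 0 always (a negative shift count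
-- raises ValueError), and for encoding > 0 additionally bits_per_item ≥ 1 (on 0 the loop never
-- terminates) and every bit chunk of the encoding must be a key of the dict (else KeyError).
def Pre_encoding_to_transaction (encoding : Int) (encoding_to_item : List (Int × String)) (bits_per_item : Int) : Prop :=
  0 ≤ bits_per_item ∧
  (0 < encoding → 1 ≤ bits_per_item ∧
    ∀ j : Nat, j < (PySem.Int.bitLength encoding + bits_per_item.toNat - 1) / bits_per_item.toNat →
      (PySem.Dict.get? (PySem.Dict.mk encoding_to_item)
        (PySem.Int.band (encoding >>> (j * bits_per_item.toNat))
          ((1 <<< bits_per_item.toNat) - 1))).isSome = true)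
instance (encoding : Int) (encoding_to_item : List (Int × String)) (bits_per_item : Int) : Decidable (Pre_encoding_to_transaction encoding encoding_to_item bits_per_item) := by unfold Pre_encoding_to_transaction; infer_instance

def pvWitness_encoding_to_transaction : Int × (List (Int × String)) × Int :=
  (54, [(0, "bread"), (1, "milk"), (2, "eggs"), (3, "beer")], 2)

def Spec_encoding_to_transaction (encoding : Int) (encoding_to_item : List (Int × String)) (bits_per_item : Int) (out : List String) : Prop := out = encoding_to_transaction_alt encoding encoding_to_item bits_per_item
instance (encoding : Int) (encoding_to_item : List (Int × String)) (bits_per_item : Int) (out : List String) : Decidable (Spec_encoding_to_transaction encoding encoding_to_item bits_per_item out) := by unfold Spec_encoding_to_transaction; infer_instance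

-- ===== CLAIM (what is proved, stated in full; the proofs are below) =====
def Claim_equal_encoding_to_transaction : Prop := ∀ (encoding : Int) (encoding_to_item : List (Int × String)) (bits_per_item : Int), Dom_encoding_to_transaction encoding encoding_to_item bits_per_item → Pre_encoding_to_transaction encoding encoding_to_item bits_per_item → Spec_encoding_to_transaction encoding encoding_to_item bits_per_item (encoding_to_transaction encoding encoding_to_item bits_per_item)

-- ===== LEMMAS AND PROOFS =====

-- the low k bits of n as '0'/'1' characters (always length k; leading zeros kept)
def pvLowBits : Nat → Nat → List Char
  | 0, _ => []
  | k + 1, n => pvLowBits k (n / 2) ++ [if n % 2 == 1 then '1' else '0']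

theorem pvLowBits_length (k n : Nat) : (pvLowBits k n).length = k := by
  induction k generalizing n with
  | zero => rfl
  | succ k ih => simp [pvLowBits, ih]

theorem pvParseBin_append_bit (s : List Char) (c : Char) :
    pvParseBin (s ++ [c]) = 2 * pvParseBin s + (if c == '1' then 1 else 0) := by
  simp [pvParseBin, List.foldl_append]

theorem pvParseBin_lowBits (k : Nat) : ∀ n : Nat, pvParseBin (pvLowBits k n) = n % 2 ^ k := by
  induction k with
  | zero => intro n; simp [pvLowBits, pvParseBin, Nat.mod_one]
  | succ k ih =>
      intro n
      rw [pvLowBits, pvParseBin_append_bit, ih]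
      have key : n % 2 ^ (k + 1) = n % 2 + 2 * (n / 2 % 2 ^ k) := by
        rw [Nat.pow_succ', Nat.mod_mul]
      rcases Nat.mod_two_eq_zero_or_one n with h | h <;> simp [h, key] <;> omega

theorem pvBinStr_split (k : Nat) : ∀ n : Nat, 2 ^ k ≤ n →
    pvBinStr n = pvBinStr (n / 2 ^ k) ++ pvLowBits k n := by
  induction k with
  | zero => intro n _; simp [pvLowBits]
  | succ k ih =>
      intro n hn
      have hp : 0 < 2 ^ (k + 1) := Nat.two_pow_pos _
      have hn0 : n ≠ 0 := by omega
      have h1 : 2 ^ k ≤ n / 2 := by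
        rw [Nat.le_div_iff_mul_le (by omega)]
        calc 2 ^ k * 2 = 2 ^ (k + 1) := (Nat.pow_succ 2 k).symm
          _ ≤ n := hn
      rw [pvBinStr, dif_neg hn0, ih (n / 2) h1]
      have hdd : n / 2 / 2 ^ k = n / 2 ^ (k + 1) := by
        rw [Nat.div_div_eq_div_mul, ← Nat.pow_succ']
      rw [hdd, List.append_assoc]
      rfl

theorem pvBinStr_length_lt : ∀ n : Nat, n < 2 ^ (pvBinStr n).length := by
  intro n
  induction n using Nat.strong_induction_on with
  | _ n ih =>
    rcases Nat.eq_zero_or_pos n with h | h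
    · subst h; simp [pvBinStr]
    · have hn0 : n ≠ 0 := by omega
      rw [pvBinStr, dif_neg hn0]
      have := ih (n / 2) (Nat.div_lt_self h (by omega))
      simp only [List.length_append, List.length_singleton]
      rw [Nat.pow_succ]
      omega

theorem pvBinStr_length_pos (n : Nat) (h : 0 < n) : 1 ≤ (pvBinStr n).length := by
  have hn0 : n ≠ 0 := by omega
  rw [pvBinStr, dif_neg hn0]
  simp

theorem pvBinStr_length_le : ∀ n : Nat, 0 < n → 2 ^ ((pvBinStr n).length - 1) ≤ n := by
  intro n
  induction n using Nat.strong_induction_on with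
  | _ n ih =>
    intro h
    have hn0 : n ≠ 0 := by omega
    rw [pvBinStr, dif_neg hn0]
    simp only [List.length_append, List.length_singleton]
    rcases Nat.eq_zero_or_pos (n / 2) with h2 | h2
    · rw [h2]; simp [pvBinStr]; omega
    · have hl := pvBinStr_length_pos (n / 2) h2
      have := ih (n / 2) (Nat.div_lt_self h (by omega)) h2
      have hstep : 2 ^ ((pvBinStr (n / 2)).length + 1 - 1)
          = 2 * 2 ^ ((pvBinStr (n / 2)).length - 1) := by
        rw [← Nat.pow_succ']
        congr 1
        omega
      rw [hstep]
      omega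

theorem pvBinStr_length_shift (k n : Nat) (h : 2 ^ k ≤ n) :
    (pvBinStr (n / 2 ^ k)).length = (pvBinStr n).length - k := by
  have := congrArg List.length (pvBinStr_split k n h)
  simp only [List.length_append, pvLowBits_length] at this
  omega

theorem pvParseBin_replicate_zero (p : Nat) (s : List Char) :
    pvParseBin (List.replicate p '0' ++ s) = pvParseBin s := by
  have h0 : (('0' : Char) == '1') = false := by decide
  induction p with
  | zero => rfl
  | succ p ih =>
      rw [List.replicate_succ, List.cons_append]
      show pvParseBin (List.replicate p '0' ++ s) = _
      exact ih

theorem pvChunkLoop_nil (d : List (Int × String)) (k : Nat) : pvChunkLoop d k [] = [] := by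
  rw [pvChunkLoop, dif_neg]
  simp

theorem pvChunkLoop_append (d : List (Int × String)) (k : Nat) (hk : 1 ≤ k) :
    ∀ N (a b : List Char), a.length = N → a.length % k = 0 →
    pvChunkLoop d k (a ++ b) = pvChunkLoop d k a ++ pvChunkLoop d k b := by
  intro N
  induction N using Nat.strong_induction_on with
  | _ N ih =>
    intro a b hlen ha
    by_cases hne : a = []
    · subst hne; rw [pvChunkLoop_nil]; rfl
    · have hlp : 0 < a.length := List.length_pos_iff.mpr hne
      have hka : k ≤ a.length := by
        rcases Nat.lt_or_ge a.length k with h | h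
        · exfalso; rw [Nat.mod_eq_of_lt h] at ha; omega
        · exact h
      have habne : a ++ b ≠ [] := by simp [hne]
      obtain ⟨c, hc⟩ := Nat.dvd_of_mod_eq_zero ha
      have hsub : a.length - k = k * (c - 1) := by
        rw [hc, Nat.mul_sub, Nat.mul_one]
      have hmod : (a.drop k).length % k = 0 := by
        rw [List.length_drop, hsub]
        exact Nat.mul_mod_right _ _
      conv_rhs => rw [pvChunkLoop, dif_pos ⟨hne, hk⟩]
      rw [pvChunkLoop, dif_pos ⟨habne, hk⟩]
      rw [List.take_append_of_le_length hka, List.drop_append_of_le_length hka]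
      rw [ih (a.drop k).length (by rw [List.length_drop]; omega) (a.drop k) b rfl hmod]
      simp

theorem pvParseBin_binStr : ∀ n : Nat, pvParseBin (pvBinStr n) = n := by
  intro n
  induction n using Nat.strong_induction_on with
  | _ n ih =>
    rcases Nat.eq_zero_or_pos n with h | h
    · subst h; rw [pvBinStr, dif_pos rfl]; rfl
    · have hn0 : n ≠ 0 := by omega
      rw [pvBinStr, dif_neg hn0, pvParseBin_append_bit,
        ih (n / 2) (Nat.div_lt_self h (by omega))]
      rcases Nat.mod_two_eq_zero_or_one n with h2 | h2 <;> simp [h2] <;> omega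

theorem pv_band_mask (m k : Nat) :
    PySem.Int.band (m : Int) (((1 <<< k : Nat) : Int) - 1) = ((m % 2 ^ k : Nat) : Int) := by
  have h1 : (1 : Nat) <<< k = 2 ^ k := by rw [Nat.shiftLeft_eq, one_mul]
  have h2 : (((1 <<< k : Nat) : Int) - 1) = (((2 ^ k - 1 : Nat)) : Int) := by
    rw [h1]
    have : 1 ≤ 2 ^ k := Nat.one_le_two_pow
    omega
  rw [h2, PySem.Int.band_natCast, Nat.and_two_pow_sub_one_eq_mod]

theorem pv_pad_mod (k L : Nat) (hk : 1 ≤ k) : ((k - L % k) % k + L) % k = 0 := by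
  have hr : L % k < k := Nat.mod_lt _ (by omega)
  have hL : k * (L / k) + L % k = L := Nat.div_add_mod L k
  rcases Nat.eq_zero_or_pos (L % k) with h | h
  · have h0 : (k - L % k) % k = 0 := by rw [h, Nat.sub_zero, Nat.mod_self]
    rw [h0, Nat.zero_add]
    exact h
  · have hin : (k - L % k) % k = k - L % k := Nat.mod_eq_of_lt (by omega)
    have hsum : k - L % k + L = k * (L / k + 1) := by
      rw [Nat.mul_add, Nat.mul_one]
      omega
    rw [hin, hsum]
    exact Nat.mul_mod_right _ _

theorem pv_chunk_single (d : List (Int × String)) (k : Nat) (hk : 1 ≤ k)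
    (s : List Char) (hs : s.length = k) :
    pvChunkLoop d k s =
      [((PySem.Dict.get? (PySem.Dict.mk d) ((pvParseBin s : Nat) : Int)).getD "")] := by
  have hne : s ≠ [] := by rintro rfl; simp at hs; omega
  rw [pvChunkLoop, dif_pos ⟨hne, hk⟩, List.take_of_length_le (by omega),
    List.drop_eq_nil_of_le (by omega), pvChunkLoop_nil]

theorem pv_negmod (k L : Nat) (hk : 1 ≤ k) :
    ((-(L : Int)) % (k : Int)).toNat = (k - L % k) % k := by
  have hd := Nat.div_add_mod L k
  have hr : L % k < k := Nat.mod_lt _ (by omega)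
  have hdz : (k : Int) * (L / k : Nat) + (L % k : Nat) = (L : Int) := by exact_mod_cast hd
  have h1 : -(L : Int) = -((L % k : Nat) : Int) + (k : Int) * (-((L / k : Nat) : Int)) := by
    rw [← hdz]; ring
  rw [h1, Int.add_mul_emod_self_left]
  rcases Nat.eq_zero_or_pos (L % k) with h0 | h0
  · rw [h0]
    simp [Nat.mod_self]
  · have h2 : -((L % k : Nat) : Int) = ((k - L % k : Nat) : Int) + (k : Int) * (-1) := by
      rw [Nat.cast_sub hr.le]; ring_nf
    have h3 : (k - L % k) % k = k - L % k := Nat.mod_eq_of_lt (by omega)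
    rw [h2, Int.add_mul_emod_self_left,
      Int.emod_eq_of_lt (by positivity) (by exact_mod_cast Nat.sub_lt (by omega) h0),
      Int.toNat_natCast, h3]

theorem pv_main (d : List (Int × String)) (k : Nat) (hk : 1 ≤ k) :
    ∀ m : Nat, 0 < m →
    pvChunkLoop d k
        (List.replicate ((k - (pvBinStr m).length % k) % k) '0' ++ pvBinStr m)
      = (etLoopA d (k : Int) (((1 <<< k : Nat) : Int) - 1) (m : Int)).reverse := by
  intro m
  induction m using Nat.strong_induction_on with
  | _ m ih =>
    intro hm
    have hL1 : 1 ≤ (pvBinStr m).length := pvBinStr_length_pos m hm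
    have hmask := pv_band_mask m k
    have hshift : ((m : Int) >>> ((k : Int)).toNat) = ((m >>> k : Nat) : Int) := by simp
    rw [etLoopA, dif_pos ⟨by exact_mod_cast hm, by exact_mod_cast hk⟩, hshift]
    rcases Nat.lt_or_ge ((pvBinStr m).length) (k + 1) with hLk' | hLk'
    · -- single chunk: m < 2 ^ k, the shifted value is 0
      have hLk : (pvBinStr m).length ≤ k := by omega
      have hmlt : m < 2 ^ k :=
        lt_of_lt_of_le (pvBinStr_length_lt m) (Nat.pow_le_pow_right (by omega) hLk)
      have hz : m >>> k = 0 := by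
        rw [Nat.shiftRight_eq_div_pow]
        exact Nat.div_eq_of_lt hmlt
      rw [hz]
      have hpad : (k - (pvBinStr m).length % k) % k + (pvBinStr m).length = k := by
        rcases Nat.eq_or_lt_of_le hLk with h | h
        · rw [h, Nat.mod_self, Nat.sub_zero, Nat.mod_self]; omega
        · rw [Nat.mod_eq_of_lt h, Nat.mod_eq_of_lt (by omega)]; omega
      rw [pv_chunk_single d k hk _ (by simp [hpad])]
      rw [pvParseBin_replicate_zero, pvParseBin_binStr]
      rw [etLoopA, dif_neg (by simp)]
      rw [hmask, Nat.mod_eq_of_lt hmlt]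
      rfl
    · -- more than one chunk: split off the low k bits
      have hLk : k < (pvBinStr m).length := by omega
      have h2k : 2 ^ k ≤ m := by
        calc 2 ^ k ≤ 2 ^ ((pvBinStr m).length - 1) := Nat.pow_le_pow_right (by omega) (by omega)
          _ ≤ m := pvBinStr_length_le m hm
      have hsr : m >>> k = m / 2 ^ k := Nat.shiftRight_eq_div_pow m k
      have hm' : 0 < m / 2 ^ k := Nat.div_pos h2k (Nat.two_pow_pos k)
      have hlen' : (pvBinStr (m / 2 ^ k)).length = (pvBinStr m).length - k :=
        pvBinStr_length_shift k m h2k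
      have hmodeq : ((pvBinStr m).length - k) % k = (pvBinStr m).length % k := by
        conv_rhs => rw [show (pvBinStr m).length = (pvBinStr m).length - k + k by omega]
        rw [Nat.add_mod_right]
      have hsplit := pvBinStr_split k m h2k
      nth_rewrite 2 [hsplit]
      rw [← List.append_assoc]
      have hfirstlen : (List.replicate ((k - (pvBinStr m).length % k) % k) '0'
          ++ pvBinStr (m / 2 ^ k)).length % k = 0 := by
        simp only [List.length_append, List.length_replicate, hlen']
        rw [← hmodeq]
        exact pv_pad_mod k ((pvBinStr m).length - k) hk
      rw [pvChunkLoop_append d k hk _ _ _ rfl hfirstlen]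
      have hrec : pvChunkLoop d k (List.replicate ((k - (pvBinStr m).length % k) % k) '0'
          ++ pvBinStr (m / 2 ^ k))
          = (etLoopA d (k : Int) (((1 <<< k : Nat) : Int) - 1) ((m / 2 ^ k : Nat) : Int)).reverse := by
        have := ih (m / 2 ^ k) (Nat.div_lt_self hm (Nat.one_lt_two_pow_iff.mpr (by omega))) hm'
        rw [hlen', hmodeq] at this
        exact this
      rw [hrec, pv_chunk_single d k hk _ (pvLowBits_length k m), pvParseBin_lowBits]
      rw [List.reverse_cons, hsr, hmask]

-- ===== VERDICT (by name: the statement is the Claim_ definition above) =====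
theorem encoding_to_transaction_spec : Claim_equal_encoding_to_transaction := by
  intro e d b _ hpre
  unfold Spec_encoding_to_transaction encoding_to_transaction encoding_to_transaction_alt
  by_cases he : e ≤ 0
  · rw [etLoopA, dif_neg (by omega), if_pos he]
  · have he' : 0 < e := by omega
    obtain ⟨m, rfl⟩ := Int.eq_ofNat_of_zero_le he'.le
    have hb : 1 ≤ b := (hpre.2 he').1
    obtain ⟨k, rfl⟩ : ∃ k : Nat, b = (k : Int) := ⟨b.toNat, by omega⟩
    have hk1 : 1 ≤ k := by exact_mod_cast hb
    have hm : 0 < m := by exact_mod_cast he'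
    rw [if_neg (by omega)]
    simp only [Int.toNat_natCast]
    have hpad : (PySem.Int.mod (-(((pvBinStr m).length : Int))) (k : Int)).toNat
        = (k - (pvBinStr m).length % k) % k := by
      rw [PySem.Int.mod_eq_emod_of_pos (by omega)]
      exact pv_negmod k _ hk1
    rw [hpad, pv_main d k hk1 m hm, List.reverse_reverse]
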